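-- pv_equiv track=rewrite | github.com/CarlsonQuick/adventOfCode2020 | day12/day12.py | rotate_waypoint
-- ===== SOURCE A (Python) =====
-- def rotate_waypoint(waypoint, direction, magnitude):
--     turns = int(magnitude/90)
--     cwp = waypoint
--     if direction == 'L':
--         turns = 4 - turns
--     for i in range(0,turns):
--         ns = cwp[0]
--         ew = cwp[1]
--         if (ns < 0 and ew < 0):
--             ew = cwp[0]
--             ns = cwp[1] * -1
--
--         elif (ns > 0 and ew > 0):
--             ns = cwp[1] * -1
--             ew = cwp[0]
--         elif( ns > 0 and ew < 0):
--             ns  = cwp[1] * -1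
--             ew = cwp[0]
--         else:
--             ew = cwp[0]
--             ns = cwp[1] * -1
--         cwp = [ns,ew]
--     return cwp
-- ===== SOURCE B (Python) =====
-- def rotate_waypoint(waypoint, direction, magnitude):
--     turns = int(magnitude/90)
--     if direction == 'L':
--         turns = 4 - turns
--     if turns <= 0:
--         return waypoint
--     ns, ew = waypoint[0], waypoint[1]
--     r = turns % 4
--     if r == 0:
--         return [ns, ew]
--     if r == 1:
--         return [-ew, ns]
--     if r == 2:
--         return [-ns, -ew]
--     return [ew, -ns]
-- ===== Notes on version B (the rewrite author's own statement) =====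
-- stated objective: simpler
-- what changed: Replaced the per-90° rotation loop with its redundant sign-based branches (all four branches compute the same step) by a single closed-form 4-case selection on turns % 4, keeping the original no-op return when turns <= 0.
import Mathlib
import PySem

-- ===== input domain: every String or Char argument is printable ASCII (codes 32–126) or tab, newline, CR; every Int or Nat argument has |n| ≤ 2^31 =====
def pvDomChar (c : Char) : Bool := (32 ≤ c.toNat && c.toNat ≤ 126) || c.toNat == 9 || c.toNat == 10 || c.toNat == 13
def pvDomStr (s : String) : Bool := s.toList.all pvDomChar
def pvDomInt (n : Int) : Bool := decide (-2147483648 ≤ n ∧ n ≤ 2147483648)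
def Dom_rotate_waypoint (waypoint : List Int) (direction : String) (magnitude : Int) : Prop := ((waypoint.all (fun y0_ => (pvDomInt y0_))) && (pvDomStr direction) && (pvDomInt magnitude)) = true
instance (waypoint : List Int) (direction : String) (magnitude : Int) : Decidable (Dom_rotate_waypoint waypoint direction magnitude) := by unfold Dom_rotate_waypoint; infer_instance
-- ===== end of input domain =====

-- B replaces A's per-90° rotation loop (whose four sign branches all compute the same step)
-- by a closed-form 4-case selection on turns % 4; equality of RETURN VALUES is proved on Pre_.

-- ===== PORT A =====
-- one iteration of A's loop body; the four sign branches are kept as written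
def pvStepA (cwp : List Int) : List Int :=
  let ns := PySem.List.pyGetD cwp 0 0
  let ew := PySem.List.pyGetD cwp 1 0
  if ns < 0 ∧ ew < 0 then
    [PySem.List.pyGetD cwp 1 0 * -1, PySem.List.pyGetD cwp 0 0]
  else if ns > 0 ∧ ew > 0 then
    [PySem.List.pyGetD cwp 1 0 * -1, PySem.List.pyGetD cwp 0 0]
  else if ns > 0 ∧ ew < 0 then
    [PySem.List.pyGetD cwp 1 0 * -1, PySem.List.pyGetD cwp 0 0]
  else
    [PySem.List.pyGetD cwp 1 0 * -1, PySem.List.pyGetD cwp 0 0]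

-- int(magnitude/90) truncates toward zero; Int.tdiv is exact for |magnitude| ≤ 2^31
-- (the float quotient rounds by far less than the distance to the next integer).
def rotate_waypoint (waypoint : List Int) (direction : String) (magnitude : Int) : List Int :=
  let turns := magnitude.tdiv 90
  let turns := if direction = "L" then 4 - turns else turns
  (PySem.List.pyRange 0 turns 1).foldl (fun cwp _ => pvStepA cwp) waypoint

-- ===== PORT B =====
def rotate_waypoint_alt (waypoint : List Int) (direction : String) (magnitude : Int) : List Int :=
  let turns := magnitude.tdiv 90
  let turns := if direction = "L" then 4 - turns else turns
  if turns ≤ 0 then waypoint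
  else
    let ns := PySem.List.pyGetD waypoint 0 0
    let ew := PySem.List.pyGetD waypoint 1 0
    let r := PySem.Int.mod turns 4
    if r = 0 then [ns, ew]
    else if r = 1 then [-ew, ns]
    else if r = 2 then [-ns, -ew]
    else [ew, -ns]

-- ===== PRECONDITION & SPEC =====
-- Pre_ excludes exactly the inputs where A raises IndexError: the loop runs (effective
-- turns > 0) but the waypoint has fewer than two entries.
def Pre_rotate_waypoint (waypoint : List Int) (direction : String) (magnitude : Int) : Prop :=
  (if direction = "L" then 4 - magnitude.tdiv 90 else magnitude.tdiv 90) ≤ 0 ∨ 2 ≤ waypoint.length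
instance (waypoint : List Int) (direction : String) (magnitude : Int) : Decidable (Pre_rotate_waypoint waypoint direction magnitude) := by unfold Pre_rotate_waypoint; infer_instance

def pvWitness_rotate_waypoint : List Int × String × Int := ([3, 5], "R", 90)

def Spec_rotate_waypoint (waypoint : List Int) (direction : String) (magnitude : Int) (out : List Int) : Prop := out = rotate_waypoint_alt waypoint direction magnitude
instance (waypoint : List Int) (direction : String) (magnitude : Int) (out : List Int) : Decidable (Spec_rotate_waypoint waypoint direction magnitude out) := by unfold Spec_rotate_waypoint; infer_instance

-- ===== CLAIM (what is proved, stated in full; the proofs are below) =====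
def Claim_equal_rotate_waypoint : Prop := ∀ (waypoint : List Int) (direction : String) (magnitude : Int), Dom_rotate_waypoint waypoint direction magnitude → Pre_rotate_waypoint waypoint direction magnitude → Spec_rotate_waypoint waypoint direction magnitude (rotate_waypoint waypoint direction magnitude)

-- ===== LEMMAS AND PROOFS =====

-- every branch of A's loop body computes the same step (ns, ew) ↦ (-ew, ns)
theorem pvStepA_eq (cwp : List Int) :
    pvStepA cwp = [-(PySem.List.pyGetD cwp 1 0), PySem.List.pyGetD cwp 0 0] := by
  unfold pvStepA
  dsimp only
  split_ifs <;> simp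

theorem foldl_const_iterate (l : List Int) (init : List Int) :
    l.foldl (fun c _ => pvStepA c) init = pvStepA^[l.length] init := by
  induction l generalizing init with
  | nil => rfl
  | cons a t ih => simp [List.foldl_cons, ih, Function.iterate_succ_apply]

theorem iterate_step (k : Nat) (x y : Int) :
    pvStepA^[k] [x, y] =
      if k % 4 = 0 then [x, y]
      else if k % 4 = 1 then [-y, x]
      else if k % 4 = 2 then [-x, -y]
      else [y, -x] := by
  induction k generalizing x y with
  | zero => simp
  | succ k ih =>
    have h1 : pvStepA [x, y] = [-y, x] := by
      rw [pvStepA_eq]; simp [PySem.List.pyGetD]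
    rw [Function.iterate_succ_apply, h1, ih]
    have h4 : k % 4 = 0 ∨ k % 4 = 1 ∨ k % 4 = 2 ∨ k % 4 = 3 := by omega
    rcases h4 with h | h | h | h <;>
      · have : (k + 1) % 4 = (k % 4 + 1) % 4 := by omega
        simp [h, this]

-- ===== VERDICT (by name: the statement is the Claim_ definition above) =====
theorem rotate_waypoint_spec : Claim_equal_rotate_waypoint := by
  intro waypoint direction magnitude _ hpre
  unfold Spec_rotate_waypoint rotate_waypoint rotate_waypoint_alt
  dsimp only
  set t := (if direction = "L" then 4 - magnitude.tdiv 90 else magnitude.tdiv 90) with ht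
  by_cases hle : t ≤ 0
  · rw [PySem.List.pyRange_one_eq_nil hle]
    simp [hle]
  · have hpos : 0 < t := by omega
    rw [foldl_const_iterate]
    rw [PySem.List.length_pyRange_one]
    have htn : 1 ≤ (t - 0).toNat := by omega
    set n := (t - 0).toNat with hn
    have hstep : pvStepA^[n] waypoint = pvStepA^[n - 1] (pvStepA waypoint) := by
      conv_lhs => rw [show n = (n - 1) + 1 by omega]
      rw [Function.iterate_succ_apply]
    rw [hstep, pvStepA_eq waypoint,
      iterate_step (n - 1) (-(PySem.List.pyGetD waypoint 1 0)) (PySem.List.pyGetD waypoint 0 0)]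
    have hmod : PySem.Int.mod t 4 = ((n % 4 : Nat) : Int) := by
      rw [PySem.Int.mod_eq_emod_of_pos (by omega)]
      omega
    rw [if_neg hle, hmod]
    have h4 : n % 4 = 0 ∨ n % 4 = 1 ∨ n % 4 = 2 ∨ n % 4 = 3 := by omega
    rcases h4 with h | h | h | h <;>
      · have h' : (n - 1) % 4 = (n % 4 + 3) % 4 := by omega
        simp [h, h']
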